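-- pv_equiv track=rewrite | github.com/BeaconLin/Rent-House-Agent | RentHouseAgent/agent/core.py | compress_history
-- ===== SOURCE A (Python) =====
-- from typing import List, Tuple, Optional, Dict, Any
--
-- MAX_HISTORY_ROUNDS = 10
--
-- def compress_history(history: List[dict]) -> List[dict]:
--     """
--     压缩对话历史，只保留最近的N轮对话
--
--     Args:
--         history: 完整的对话历史
--
--     Returns:
--         压缩后的对话历史
--     """
--     if not history:
--         return []
--
--     # 计算轮数（每轮包含user和assistant两条消息）
--     rounds = []
--     current_round = []
--
--     for msg in history:
--         if msg.get("role") == "user":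
--             if current_round:
--                 rounds.append(current_round)
--             current_round = [msg]
--         elif msg.get("role") in ["assistant", "tool"]:
--             current_round.append(msg)
--
--     if current_round:
--         rounds.append(current_round)
--
--     # 只保留最近的N轮
--     if len(rounds) > MAX_HISTORY_ROUNDS:
--         rounds = rounds[-MAX_HISTORY_ROUNDS:]
--
--     # 展平列表
--     compressed = []
--     for round_msgs in rounds:
--         compressed.extend(round_msgs)
--
--     return compressed
-- ===== SOURCE B (Python) =====
-- MAX_HISTORY_ROUNDS = 10
--
--
-- def compress_history(history):
--     """Keep the last MAX_HISTORY_ROUNDS conversation rounds: single reverse scan."""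
--     kept = []
--     users = 0
--     for msg in reversed(history):
--         role = msg.get("role")
--         if role not in ("user", "assistant", "tool"):
--             continue
--         kept.append(msg)
--         if role == "user":
--             users += 1
--             if users == MAX_HISTORY_ROUNDS:
--                 break
--     kept.reverse()
--     return kept
-- ===== Notes on version B (the rewrite author's own statement) =====
-- stated objective: simpler
-- what changed: B replaces A's three-phase pipeline (group messages into rounds, truncate to the last 10 rounds, flatten) by a single reverse scan that collects kept messages and stops right after the 10th user message from the end.
import Mathlib
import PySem

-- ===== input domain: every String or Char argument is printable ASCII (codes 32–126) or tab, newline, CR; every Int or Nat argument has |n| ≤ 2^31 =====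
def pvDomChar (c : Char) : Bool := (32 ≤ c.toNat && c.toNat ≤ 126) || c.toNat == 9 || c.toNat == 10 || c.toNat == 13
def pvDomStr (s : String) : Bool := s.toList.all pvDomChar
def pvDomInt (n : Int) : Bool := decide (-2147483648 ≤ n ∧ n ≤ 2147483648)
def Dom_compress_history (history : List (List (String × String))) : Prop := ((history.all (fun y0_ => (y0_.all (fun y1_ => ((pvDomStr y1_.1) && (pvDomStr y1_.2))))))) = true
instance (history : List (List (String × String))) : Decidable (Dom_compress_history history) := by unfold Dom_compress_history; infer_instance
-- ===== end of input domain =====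

-- B replaces A's group-into-rounds / truncate / flatten pipeline by a single reverse scan
-- that stops after the 10th user message from the end (objective: simpler).

-- ===== PORT A =====
def chRole (m : List (String × String)) : Option String :=
  (PySem.Dict.ofList m).get? "role"

def chStep (st : List (List (List (String × String))) × List (List (String × String)))
    (msg : List (String × String)) :
    List (List (List (String × String))) × List (List (String × String)) :=
  if chRole msg = some "user" then
    ((if st.2 ≠ [] then st.1 ++ [st.2] else st.1), [msg])
  else if chRole msg = some "assistant" ∨ chRole msg = some "tool" then
    (st.1, st.2 ++ [msg])
  else st

def compress_history (history : List (List (String × String))) : List (List (String × String)) :=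
  if history = [] then []
  else
    let st := history.foldl chStep ([], [])
    let rounds := if st.2 ≠ [] then st.1 ++ [st.2] else st.1
    let rounds := if rounds.length > 10 then PySem.List.slice rounds (some (-10)) none else rounds
    rounds.foldl (fun acc r => acc ++ r) []

-- ===== PORT B =====
def goB : List (List (String × String)) → Nat → List (List (String × String)) → List (List (String × String))
  | [], _, acc => acc.reverse
  | m :: rest, users, acc =>
    if chRole m = some "user" ∨ chRole m = some "assistant" ∨ chRole m = some "tool" then
      if chRole m = some "user" then
        if users + 1 = 10 then (acc ++ [m]).reverse else goB rest (users + 1) (acc ++ [m])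
      else goB rest users (acc ++ [m])
    else goB rest users acc

def compress_history_alt (history : List (List (String × String))) : List (List (String × String)) :=
  goB history.reverse 0 []

-- ===== PRECONDITION & SPEC =====
def Spec_compress_history (history : List (List (String × String))) (out : List (List (String × String))) : Prop := out = compress_history_alt history
instance (history : List (List (String × String))) (out : List (List (String × String))) : Decidable (Spec_compress_history history out) := by unfold Spec_compress_history; infer_instance

-- ===== CLAIM (what is proved, stated in full; the proofs are below) =====
def Claim_equal_compress_history : Prop := ∀ (history : List (List (String × String))), Dom_compress_history history → Spec_compress_history history (compress_history history)

-- ===== LEMMAS AND PROOFS =====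

def isUser (m : List (String × String)) : Bool := decide (chRole m = some "user")
def isKA (m : List (String × String)) : Bool := decide (chRole m = some "assistant" ∨ chRole m = some "tool")
def isKept (m : List (String × String)) : Bool := isUser m || isKA m

def ucount (l : List (List (String × String))) : Nat := l.countP isUser

def KeptOnly (l : List (List (String × String))) : Prop := ∀ m ∈ l, isKept m = true

-- A's grouping into rounds, as a structural recursion
def grounds (cur : List (List (String × String))) :
    List (List (String × String)) → List (List (List (String × String)))
  | [] => if cur = [] then [] else [cur]
  | m :: r =>
    if isUser m then
      if cur = [] then grounds [m] r else cur :: grounds [m] r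
    else if isKA m then grounds (cur ++ [m]) r
    else grounds cur r

-- prefix of a (kept-only) list up to and including its n-th user message
def tu : List (List (String × String)) → Nat → List (List (String × String))
  | [], _ => []
  | m :: r, n => if isUser m then (if n ≤ 1 then [m] else m :: tu r (n - 1)) else m :: tu r n

-- suffix of a list starting at its n-th-from-last user message
def sfu : List (List (String × String)) → Nat → List (List (String × String))
  | [], _ => []
  | m :: r, n => if isUser m ∧ ucount r + 1 = n then m :: r else sfu r n

theorem ucount_cons (m : List (String × String)) (r : List (List (String × String))) :
    ucount (m :: r) = ucount r + (if isUser m = true then 1 else 0) := by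
  simp [ucount, List.countP_cons]

theorem sfu_cons (m : List (String × String)) (r : List (List (String × String))) (n : Nat) :
    sfu (m :: r) n = if isUser m = true ∧ ucount r + 1 = n then m :: r else sfu r n := rfl

theorem fold_eq_grounds (l : List (List (String × String)))
    (rounds : List (List (List (String × String)))) (cur : List (List (String × String))) :
    (let st := l.foldl chStep (rounds, cur);
     if st.2 ≠ [] then st.1 ++ [st.2] else st.1) = rounds ++ grounds cur l := by
  induction l generalizing rounds cur with
  | nil =>
      simp only [List.foldl_nil, grounds]
      by_cases h : cur = [] <;> simp [h]
  | cons m r ih =>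
      simp only [List.foldl_cons, grounds, chStep, isUser, isKA, decide_eq_true_eq]
      by_cases hu : chRole m = some "user"
      · by_cases hc : cur = [] <;> simp [hu, hc, ih]
      · by_cases hk : chRole m = some "assistant" ∨ chRole m = some "tool"
        · simp [hu, hk, ih]
        · simp [hu, hk, ih]

theorem foldl_append_flatten (R : List (List (List (String × String))))
    (acc : List (List (String × String))) :
    R.foldl (fun a r => a ++ r) acc = acc ++ R.flatten := by
  induction R generalizing acc with
  | nil => simp
  | cons r R ih => simp [ih]

theorem grounds_filter (l : List (List (String × String))) (cur : List (List (String × String))) :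
    grounds cur l = grounds cur (l.filter isKept) := by
  induction l generalizing cur with
  | nil => simp
  | cons m r ih =>
      by_cases hu : isUser m
      · have : isKept m = true := by simp [isKept, hu]
        by_cases hc : cur = [] <;>
          simp [grounds, hu, hc, this, List.filter_cons, ih]
      · by_cases hk : isKA m
        · have : isKept m = true := by simp [isKept, hk]
          simp [grounds, hu, hk, this, List.filter_cons, ih]
        · have : isKept m = false := by simp [isKept, hu, hk]
          simp [grounds, hu, hk, this, List.filter_cons, ih]

theorem flatten_grounds (l : List (List (String × String))) (cur : List (List (String × String)))
    (hk : KeptOnly l) : (grounds cur l).flatten = cur ++ l := by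
  induction l generalizing cur with
  | nil =>
      by_cases hc : cur = [] <;> simp [grounds, hc]
  | cons m r ih =>
      have hm : isKept m = true := hk m (by simp)
      have hr : KeptOnly r := fun x hx => hk x (by simp [hx])
      by_cases hu : isUser m
      · by_cases hc : cur = [] <;> simp [grounds, hu, hc, ih [m] hr]
      · have hka : isKA m := by
          cases h' : isKA m
          · simp [isKept, hu, h'] at hm
          · rfl
        simp [grounds, hu, hka, ih _ hr]

theorem length_grounds (l : List (List (String × String))) (cur : List (List (String × String)))
    (hc : cur ≠ []) (hk : KeptOnly l) : (grounds cur l).length = 1 + ucount l := by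
  induction l generalizing cur with
  | nil => simp [grounds, hc, ucount]
  | cons m r ih =>
      have hm : isKept m = true := hk m (by simp)
      have hr : KeptOnly r := fun x hx => hk x (by simp [hx])
      by_cases hu : isUser m
      · have := ih [m] (by simp) hr
        simp [grounds, hu, hc, this, ucount, List.countP_cons]
        omega
      · have hka : isKA m := by
          cases h' : isKA m
          · simp [isKept, hu, h'] at hm
          · rfl
        have := ih (cur ++ [m]) (by simp) hr
        simp [grounds, hu, hka, this, ucount, List.countP_cons, hu]

theorem drop_grounds (l : List (List (String × String))) (cur : List (List (String × String)))
    (j : Nat) (hk : KeptOnly l) (h1 : 1 ≤ j) (h2 : j ≤ ucount l) :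
    ((grounds cur l).drop ((grounds cur l).length - j)).flatten = sfu l j := by
  induction l generalizing cur with
  | nil => simp [ucount] at h2; omega
  | cons m r ih =>
      have hm : isKept m = true := hk m (by simp)
      have hr : KeptOnly r := fun x hx => hk x (by simp [hx])
      by_cases hu : isUser m
      · have hlen : (grounds [m] r).length = 1 + ucount r :=
          length_grounds r [m] (by simp) hr
        have hul : ucount (m :: r) = ucount r + 1 := by
          simp [ucount, List.countP_cons, hu]
        have hgnil : grounds ([] : List (List (String × String))) (m :: r) = grounds [m] r := by
          simp [grounds, hu]
        have hgc : ∀ cur : List (List (String × String)), cur ≠ [] →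
            grounds cur (m :: r) = cur :: grounds [m] r := fun cur hc => by
          simp [grounds, hu, hc]
        by_cases hj : j ≤ ucount r
        · have core := ih [m] hr hj
          have hcond : ¬ (isUser m = true ∧ ucount r + 1 = j) := by
            intro ⟨_, h⟩; omega
          have hsfu : sfu (m :: r) j = sfu r j := by rw [sfu_cons, if_neg hcond]
          by_cases hc : cur = []
          · subst hc; rw [hgnil, hsfu]; exact core
          · rw [hgc cur hc, hsfu]
            have h1' : (cur :: grounds [m] r).length - j = ((grounds [m] r).length - j) + 1 := by
              simp only [List.length_cons]; omega
            rw [h1', List.drop_succ_cons]; exact core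
        · have hj' : ucount r + 1 = j := by omega
          have hcond : isUser m = true ∧ ucount r + 1 = j := ⟨hu, hj'⟩
          have hflat : (grounds [m] r).flatten = m :: r := by
            simpa using flatten_grounds r [m] hr
          have hsfu : sfu (m :: r) j = m :: r := by rw [sfu_cons, if_pos hcond]
          by_cases hc : cur = []
          · subst hc
            rw [hgnil, hsfu, show (grounds [m] r).length - j = 0 by omega, List.drop_zero, hflat]
          · rw [hgc cur hc, hsfu]
            have h1' : (cur :: grounds [m] r).length - j = 0 + 1 := by
              simp only [List.length_cons]; omega
            rw [h1', List.drop_succ_cons, List.drop_zero, hflat]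
      · have hka : isKA m := by
          cases h' : isKA m
          · simp [isKept, hu, h'] at hm
          · rfl
        have hur : ucount (m :: r) = ucount r := by
          simp [ucount, List.countP_cons, hu]
        have hj : j ≤ ucount r := by omega
        have hcond : ¬ (isUser m = true ∧ ucount r + 1 = j) := by
          intro ⟨h, _⟩; exact hu h
        have hsfu : sfu (m :: r) j = sfu r j := by rw [sfu_cons, if_neg hcond]
        by_cases hc : cur = []
        · have : grounds cur (m :: r) = grounds [m] r := by simp [grounds, hu, hka, hc]
          rw [this, hsfu]; exact ih [m] hr hj
        · have : grounds cur (m :: r) = grounds (cur ++ [m]) r := by simp [grounds, hu, hka, hc]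
          rw [this, hsfu]; exact ih (cur ++ [m]) hr hj

theorem tu_single (m : List (String × String)) (n : Nat) : tu [m] n = [m] := by
  by_cases hu : isUser m <;> by_cases h1 : n ≤ 1 <;> simp [tu, hu, h1]

theorem tu_append (xs ys : List (List (String × String))) (n : Nat) (h1 : 1 ≤ n) :
    tu (xs ++ ys) n = if n ≤ ucount xs then tu xs n else xs ++ tu ys (n - ucount xs) := by
  induction xs generalizing n with
  | nil => simp [ucount]; omega
  | cons x xs ih =>
      by_cases hu : isUser x
      · have hux : ucount (x :: xs) = ucount xs + 1 := by
          simp [ucount, List.countP_cons, hu]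
        by_cases hn : n ≤ 1
        · have : n = 1 := by omega
          subst this
          simp [tu, hu, hux]
        · have ihn := ih (n - 1) (by omega)
          by_cases hle : n ≤ ucount xs + 1
          · have : n - 1 ≤ ucount xs := by omega
            simp [tu, hu, hn, hux, hle, ihn, this]
          · have : ¬ (n - 1 ≤ ucount xs) := by omega
            have harith : n - 1 - ucount xs = n - (ucount xs + 1) := by omega
            simp [tu, hu, hn, hux, hle, ihn, this, harith]
      · have hux : ucount (x :: xs) = ucount xs := by
          simp [ucount, List.countP_cons, hu]
        have hn : ¬ n ≤ 1 ∨ True := Or.inr trivial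
        by_cases hle : n ≤ ucount xs
        · simp [tu, hu, hux, hle, ih n h1]
        · simp [tu, hu, hux, hle, ih n h1]

theorem ucount_reverse (l : List (List (String × String))) : ucount l.reverse = ucount l := by
  simp [ucount]

theorem tu_rev (l : List (List (String × String))) (n : Nat) (hk : KeptOnly l) (h1 : 1 ≤ n) :
    (tu l.reverse n).reverse = if ucount l < n then l else sfu l n := by
  induction l with
  | nil => simp [tu, ucount, sfu, h1]
  | cons m r ih =>
      have hr : KeptOnly r := fun x hx => hk x (by simp [hx])
      have ihr := ih hr
      rw [List.reverse_cons, tu_append _ _ n h1, ucount_reverse]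
      by_cases hle : n ≤ ucount r
      · have hcond : ¬ (isUser m = true ∧ ucount r + 1 = n) := by
          intro ⟨_, h⟩; omega
        have hno2 : ¬ ucount (m :: r) < n := by
          rw [ucount_cons]; by_cases hu : isUser m <;> simp [hu] <;> omega
        rw [if_pos hle, ihr, if_neg (by omega : ¬ ucount r < n), if_neg hno2, sfu_cons,
          if_neg hcond]
      · rw [if_neg hle, tu_single]
        by_cases hu : isUser m
        · have hux : ucount (m :: r) = ucount r + 1 := by rw [ucount_cons]; simp [hu]
          by_cases hlt : ucount r + 1 < n
          · rw [if_pos (by omega : ucount (m :: r) < n)]; simp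
          · have heq : ucount r + 1 = n := by omega
            rw [if_neg (by omega : ¬ ucount (m :: r) < n), sfu_cons, if_pos ⟨hu, heq⟩]; simp
        · have hux : ucount (m :: r) = ucount r := by rw [ucount_cons]; simp [hu]
          rw [if_pos (by omega : ucount (m :: r) < n)]; simp

theorem goB_filter (l : List (List (String × String))) (c : Nat)
    (acc : List (List (String × String))) : goB l c acc = goB (l.filter isKept) c acc := by
  induction l generalizing c acc with
  | nil => simp
  | cons m r ih =>
      by_cases hkm : chRole m = some "user" ∨ chRole m = some "assistant" ∨ chRole m = some "tool"
      · have : isKept m = true := by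
          simp only [isKept, isUser, isKA, Bool.or_eq_true, decide_eq_true_eq]
          tauto
        simp only [goB, hkm, if_true, List.filter_cons, this]
        by_cases hu : chRole m = some "user"
        · by_cases hc : c + 1 = 10 <;> simp [goB, hkm, hu, hc, ih]
        · simp [goB, hkm, hu, ih]
      · have : isKept m = false := by
          simp only [isKept, isUser, isKA, Bool.or_eq_false_iff, decide_eq_false_iff_not]
          tauto
        simp [goB, hkm, List.filter_cons, this, ih]

theorem goB_eq_tu (l : List (List (String × String))) (c : Nat)
    (acc : List (List (String × String))) (hk : KeptOnly l) (hc : c < 10) :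
    goB l c acc = (acc ++ tu l (10 - c)).reverse := by
  induction l generalizing c acc with
  | nil => simp [goB, tu]
  | cons m r ih =>
      have hm : isKept m = true := hk m (by simp)
      have hr : KeptOnly r := fun x hx => hk x (by simp [hx])
      have hkm : chRole m = some "user" ∨ chRole m = some "assistant" ∨ chRole m = some "tool" := by
        simp only [isKept, isUser, isKA, Bool.or_eq_true, decide_eq_true_eq] at hm
        tauto
      by_cases hu : chRole m = some "user"
      · have hub : isUser m := by simp [isUser, hu]
        by_cases h10 : c + 1 = 10
        · have : 10 - c ≤ 1 := by omega
          simp [goB, hkm, hu, h10, tu, hub, this]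
        · have hlt : c + 1 < 10 := by omega
          have : ¬ (10 - c ≤ 1) := by omega
          have harith : 10 - (c + 1) = 10 - c - 1 := by omega
          simp [goB, hkm, hu, h10, tu, hub, this, ih (c + 1) _ hr hlt, harith]
      · have hub : ¬ isUser m := by simp [isUser, hu]
        have hka : chRole m = some "assistant" ∨ chRole m = some "tool" := by tauto
        rcases hka with hka | hka <;> simp [goB, hu, hka, tu, hub, ih c _ hr hc]

theorem kept_filter (l : List (List (String × String))) : KeptOnly (l.filter isKept) := by
  intro m hm
  exact (List.mem_filter.mp hm).2

theorem A_char (h : List (List (String × String))) :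
    compress_history h =
      (if ucount (h.filter isKept) < 10 then h.filter isKept else sfu (h.filter isKept) 10) := by
  by_cases hnil : h = []
  · simp [compress_history, hnil, ucount, List.filter, sfu]
  · unfold compress_history
    rw [if_neg hnil]
    have hfold := fold_eq_grounds h [] []
    simp only [List.nil_append] at hfold
    set K := h.filter isKept with hK
    have hkK : KeptOnly K := kept_filter h
    have hg : grounds ([] : List (List (String × String))) h = grounds [] K := grounds_filter h []
    rw [hg] at hfold
    simp only []
    rw [hfold]
    cases hKc : K with
    | nil => simp [hKc, grounds, ucount, sfu]
    | cons m r =>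
        have hm : isKept m = true := hkK m (by simp [hKc])
        have hrK : KeptOnly r := fun x hx => hkK x (by simp [hKc, hx])
        have hlen : (grounds [m] r).length = 1 + ucount r := length_grounds r [m] (by simp) hrK
        have hflat : (grounds [m] r).flatten = m :: r := by simpa using flatten_grounds r [m] hrK
        by_cases hu : isUser m
        · have hgK : grounds [] (m :: r) = grounds [m] r := by simp [grounds, hu]
          have hucK : ucount (m :: r) = ucount r + 1 := by
            simp [ucount, List.countP_cons, hu]
          by_cases hbig : (grounds [m] r).length > 10
          · have h2 : 10 ≤ ucount (m :: r) := by omega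
            have := drop_grounds (m :: r) [] 10 (hKc ▸ hkK) (by omega) h2
            rw [hgK, if_pos hbig,
              PySem.List.slice_from_neg_ofNat _ 10 (by omega), foldl_append_flatten]
            simp only [List.nil_append]
            rw [show ((grounds [m] r).drop ((grounds [m] r).length - 10)).flatten = sfu (m :: r) 10
                from by rw [← hgK]; exact this]
            have : ¬ ucount (m :: r) < 10 := by omega
            simp [this]
          · rw [hgK, if_neg hbig, foldl_append_flatten]
            simp only [List.nil_append, hflat]
            by_cases hlt : ucount (m :: r) < 10
            · simp [hlt]
            · have heq : ucount r + 1 = 10 := by omega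
              have hcond : isUser m = true ∧ ucount r + 1 = 10 := ⟨hu, heq⟩
              simp [hlt, sfu, hcond]
        · have hgK : grounds [] (m :: r) = grounds [m] r := by
            have hka : isKA m := by
              cases h' : isKA m
              · simp [isKept, hu, h'] at hm
              · rfl
            simp [grounds, hu, hka]
          have hucK : ucount (m :: r) = ucount r := by
            simp [ucount, List.countP_cons, hu]
          by_cases hbig : (grounds [m] r).length > 10
          · have h2 : 10 ≤ ucount (m :: r) := by omega
            have := drop_grounds (m :: r) [] 10 (hKc ▸ hkK) (by omega) h2
            rw [hgK, if_pos hbig,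
              PySem.List.slice_from_neg_ofNat _ 10 (by omega), foldl_append_flatten]
            simp only [List.nil_append]
            rw [show ((grounds [m] r).drop ((grounds [m] r).length - 10)).flatten = sfu (m :: r) 10
                from by rw [← hgK]; exact this]
            have : ¬ ucount (m :: r) < 10 := by omega
            simp [this]
          · rw [hgK, if_neg hbig, foldl_append_flatten]
            simp only [List.nil_append, hflat]
            have : ucount (m :: r) < 10 := by omega
            simp [this]

theorem B_char (h : List (List (String × String))) :
    compress_history_alt h =
      (if ucount (h.filter isKept) < 10 then h.filter isKept else sfu (h.filter isKept) 10) := by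
  unfold compress_history_alt
  rw [goB_filter]
  have hrev : h.reverse.filter isKept = (h.filter isKept).reverse := by
    simp [List.filter_reverse]
  rw [hrev, goB_eq_tu _ 0 [] (by intro m hm; exact kept_filter h m (List.mem_reverse.mp hm))
      (by omega)]
  simpa using tu_rev (h.filter isKept) 10 (kept_filter h) (by omega)

-- ===== VERDICT (by name: the statement is the Claim_ definition above) =====
theorem compress_history_spec : Claim_equal_compress_history := by
  intro history _
  unfold Spec_compress_history
  rw [A_char, B_char]
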